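-- pv_equiv track=rewrite | github.com/davidmeijer/CLM-Harvest | paras/src/paras/parsing.py | _get_gap_adjusted_positions
-- ===== SOURCE A (Python) =====
-- from typing import Optional
--
-- def _get_gap_adjusted_positions(query: str, positions: list[int], offset: int) -> list[Optional[int]]:
--     """Return sequence positions adjusted for gaps
--
--     :param query: query sequence
--     :type query: str
--     :param positions: positions in the gapped query sequence
--     :type positions: list[int]
--     :param offset: query start position
--     :type offset: int
--     :return: list of gap-adjusted positions
--     :rtype: list[int]
--     """
--     adjusted_positions: list[Optional[int]] = []
--     position = offset
--     for i, char in enumerate(query):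
--         if i in positions:
--             if char != '-':
--                 adjusted_positions.append(position)
--             else:
--                 adjusted_positions.append(None)
--         if char != '-':
--             position += 1
--
--     return adjusted_positions
-- ===== SOURCE B (Python) =====
-- from typing import Optional
--
-- def _get_gap_adjusted_positions(query: str, positions: list[int], offset: int) -> list[Optional[int]]:
--     # Prefix table of non-gap counts, then walk the sorted deduped in-range positions.
--     pref = []
--     count = 0
--     for ch in query:
--         pref.append(count)
--         if ch != '-':
--             count += 1
--     targets = sorted(set(p for p in positions if 0 <= p < len(query)))
--     return [offset + pref[p] if query[p] != '-' else None for p in targets]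
-- ===== Notes on version B (the rewrite author's own statement) =====
-- stated objective: faster
-- what changed: Replaces A's scan over every character of the gapped query with an 'i in positions' list-membership test per character by a one-pass prefix table of non-gap counts plus a walk over the sorted, deduped, range-filtered positions.
import Mathlib
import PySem

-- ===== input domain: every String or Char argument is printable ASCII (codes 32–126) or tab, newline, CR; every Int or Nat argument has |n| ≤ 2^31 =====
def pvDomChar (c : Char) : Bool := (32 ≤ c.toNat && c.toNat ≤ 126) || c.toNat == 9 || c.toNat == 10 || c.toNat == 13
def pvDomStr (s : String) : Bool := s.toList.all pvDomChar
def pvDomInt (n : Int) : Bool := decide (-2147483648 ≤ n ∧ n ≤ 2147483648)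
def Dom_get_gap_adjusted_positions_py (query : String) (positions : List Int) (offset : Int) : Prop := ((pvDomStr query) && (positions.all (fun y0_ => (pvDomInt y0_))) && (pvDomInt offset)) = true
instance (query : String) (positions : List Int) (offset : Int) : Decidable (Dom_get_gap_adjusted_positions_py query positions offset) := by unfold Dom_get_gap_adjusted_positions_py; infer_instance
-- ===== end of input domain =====

-- B replaces A's per-character scan with a membership test (O(n·m)) by a prefix-count
-- table plus a walk over the sorted, deduped, range-filtered positions.


-- ===== PORT A =====
def get_gap_adjusted_positions_py (query : String) (positions : List Int) (offset : Int) : List (Option Int) :=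
  ((PySem.List.enumerate query.toList).foldl
    (fun (st : List (Option Int) × Int) ic =>
      ((if ic.1 ∈ positions then
          st.1 ++ [if ic.2 ≠ '-' then some st.2 else none]
        else st.1),
       (if ic.2 ≠ '-' then st.2 + 1 else st.2)))
    ([], offset)).1

-- ===== PORT B =====
def get_gap_adjusted_positions_py_alt (query : String) (positions : List Int) (offset : Int) : List (Option Int) :=
  let chars := query.toList
  -- pref.append(count); if ch != '-': count += 1
  let pref : List Int :=
    (chars.foldl (fun (st : List Int × Int) ch =>
      (st.1 ++ [st.2], if ch ≠ '-' then st.2 + 1 else st.2)) ([], 0)).1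
  -- targets = sorted(set(p for p in positions if 0 <= p < len(query)))
  let targets :=
    PySem.List.sorted (PySem.Set.ofList (positions.filter (fun p => decide (0 ≤ p) && decide (p < (chars.length : Int))))) (fun x => x) false
  -- pref[p] / query[p]: every target is in range, so the defaults are never used (exact)
  targets.map (fun p =>
    if PySem.List.pyGetD chars p ' ' ≠ '-' then some (offset + PySem.List.pyGetD pref p 0) else none)

-- ===== PRECONDITION & SPEC =====
def Spec_get_gap_adjusted_positions_py (query : String) (positions : List Int) (offset : Int) (out : List (Option Int)) : Prop := out = get_gap_adjusted_positions_py_alt query positions offset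
instance (query : String) (positions : List Int) (offset : Int) (out : List (Option Int)) : Decidable (Spec_get_gap_adjusted_positions_py query positions offset out) := by unfold Spec_get_gap_adjusted_positions_py; infer_instance

-- ===== CLAIM (what is proved, stated in full; the proofs are below) =====
def Claim_equal_get_gap_adjusted_positions_py : Prop := ∀ (query : String) (positions : List Int) (offset : Int), Dom_get_gap_adjusted_positions_py query positions offset → Spec_get_gap_adjusted_positions_py query positions offset (get_gap_adjusted_positions_py query positions offset)

-- ===== LEMMAS AND PROOFS =====

-- the common value: for each in-range index i (ascending) that occurs in positions,
-- offset + (non-gap chars before i) if chars[i] is not a gap, else none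
def gapSpec (chars : List Char) (positions : List Int) (offset : Int) : List (Option Int) :=
  ((List.range chars.length).filter (fun i : Nat => decide ((i : Int) ∈ positions))).map
    (fun i => if chars.getD i ' ' ≠ '-' then some (offset + ((chars.take i).countP (fun c => c ≠ '-') : Int)) else none)

lemma gapSpec_append (cs : List Char) (c : Char) (positions : List Int) (offset : Int) :
    gapSpec (cs ++ [c]) positions offset =
      gapSpec cs positions offset ++
        (if (cs.length : Int) ∈ positions then
          [if c ≠ '-' then some (offset + (cs.countP (fun c => c ≠ '-') : Int)) else none]
        else []) := by
  simp only [gapSpec, List.length_append, List.length_cons, List.length_nil,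
    List.range_succ, List.filter_append, List.map_append]
  congr 1
  · apply List.map_congr_left
    intro i hi
    have hlt : i < cs.length := List.mem_range.1 (List.mem_filter.1 hi).1
    rw [List.getD_append cs [c] ' ' i hlt, List.take_append_of_le_length (le_of_lt hlt)]
  · by_cases h : (cs.length : Int) ∈ positions
    · simp [List.filter, h, List.getD]
    · simp [List.filter, h]

lemma loopA (positions : List Int) (offset : Int) (chars : List Char) :
    ((PySem.List.enumerate chars).foldl
      (fun (st : List (Option Int) × Int) ic =>
        ((if ic.1 ∈ positions then
            st.1 ++ [if ic.2 ≠ '-' then some st.2 else none]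
          else st.1),
         (if ic.2 ≠ '-' then st.2 + 1 else st.2)))
      ([], offset))
    = (gapSpec chars positions offset, offset + (chars.countP (fun c => c ≠ '-') : Int)) := by
  induction chars using List.reverseRecOn with
  | nil => simp [gapSpec, PySem.List.enumerate]
  | append_singleton cs c ih =>
    rw [PySem.List.enumerate_append, List.foldl_append, ih, gapSpec_append]
    simp only [PySem.List.enumerate, List.foldl_cons, List.foldl_nil, zero_add]
    by_cases hm : (cs.length : Int) ∈ positions <;> by_cases hc : c ≠ '-' <;>
      simp [hm, hc, List.countP_append] <;> ring

lemma prefB (chars : List Char) :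
    (chars.foldl (fun (st : List Int × Int) ch =>
      (st.1 ++ [st.2], if ch ≠ '-' then st.2 + 1 else st.2)) ([], 0))
    = ((List.range chars.length).map (fun i => ((chars.take i).countP (fun c => c ≠ '-') : Int)),
       (chars.countP (fun c => c ≠ '-') : Int)) := by
  induction chars using List.reverseRecOn with
  | nil => simp
  | append_singleton cs c ih =>
    rw [List.foldl_append, ih]
    simp only [List.foldl_cons, List.foldl_nil]
    refine Prod.ext ?_ ?_
    · simp only [List.length_append, List.length_cons, List.length_nil, List.range_succ,
        List.map_append]
      congr 1
      · apply List.map_congr_left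
        intro i hi
        rw [List.take_append_of_le_length (le_of_lt (List.mem_range.1 hi))]
      · simp
    · by_cases hc : c ≠ '-' <;> simp [hc, List.countP_append]

lemma targets_eq (n : Nat) (positions : List Int) :
    PySem.List.sorted (PySem.Set.ofList (positions.filter (fun p => decide (0 ≤ p) && decide (p < (n : Int))))) (fun x => x) false
    = ((List.range n).filter (fun i : Nat => decide ((i : Int) ∈ positions))).map (fun i : Nat => (i : Int)) := by
  apply PySem.List.sorted_eq_of_perm_of_pairwise_lt
  · refine (List.perm_ext_iff_of_nodup ?_ (PySem.Set.nodup_ofList _)).mpr ?_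
    · exact (List.nodup_range.filter _).map (fun a b h => by exact_mod_cast h)
    · intro a
      simp only [List.mem_map, List.mem_filter, List.mem_range, PySem.Set.mem_ofList,
        decide_eq_true_eq, Bool.and_eq_true]
      constructor
      · rintro ⟨i, ⟨hi, hp⟩, rfl⟩
        exact ⟨hp, by omega, by exact_mod_cast hi⟩
      · rintro ⟨hp, h0, hn⟩
        exact ⟨a.toNat, ⟨by omega, by rwa [Int.toNat_of_nonneg h0]⟩, Int.toNat_of_nonneg h0⟩
  · exact List.pairwise_lt_range.filter _ |>.map _ (fun a b h => by exact_mod_cast h)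

lemma altB (query : String) (positions : List Int) (offset : Int) :
    get_gap_adjusted_positions_py_alt query positions offset = gapSpec query.toList positions offset := by
  unfold get_gap_adjusted_positions_py_alt
  dsimp only
  rw [prefB, targets_eq, List.map_map, gapSpec]
  apply List.map_congr_left
  intro i hi
  have hlt : i < query.toList.length := List.mem_range.1 (List.mem_filter.1 hi).1
  simp only [Function.comp_apply, PySem.List.pyGetD_natCast,
    PySem.List.getD_map_range _ _ _ _ hlt]

-- ===== VERDICT (by name: the statement is the Claim_ definition above) =====
theorem get_gap_adjusted_positions_py_spec : Claim_equal_get_gap_adjusted_positions_py := by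
  intro query positions offset _
  unfold Spec_get_gap_adjusted_positions_py get_gap_adjusted_positions_py
  rw [loopA, altB]
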